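-- pv_equiv track=rewrite | github.com/ruahcoach/saju-mobile | app_mobile.py | build_dayun_list_indices
-- ===== SOURCE A (Python) =====
-- def build_dayun_list_indices(month_gidx: int, month_bidx: int, forward: bool, start_age: int, count: int = 10):
--     dirv = 1 if forward else -1
--     out = []
--     for i in range(1, count + 1):
--         g_i = (month_gidx + dirv * i) % 10
--         b_i = (month_bidx + dirv * i) % 12
--         out.append({"start_age": start_age + (i - 1) * 10, "g_idx": g_i, "b_idx": b_i})
--     return out
-- ===== SOURCE B (Python) =====
-- def _cycle_run(m, first, step, n):
--     # one full period of the cyclic index sequence, as a rotation of range(m)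
--     base = list(range(m))
--     if step == 1:
--         rot = base[first:] + base[:first]
--     else:
--         rot = list(reversed(base[:first + 1])) + list(reversed(base[first + 1:]))
--     reps = (n + m - 1) // m
--     return (rot * reps)[:n]
--
--
-- def build_dayun_list_indices(month_gidx: int, month_bidx: int, forward: bool, start_age: int, count: int = 10):
--     n = count if count > 0 else 0
--     step = 1 if forward else -1
--     gs = _cycle_run(10, (month_gidx + step) % 10, step, n)
--     bs = _cycle_run(12, (month_bidx + step) % 12, step, n)
--     ages = range(start_age, start_age + 10 * n, 10)
--     return [{"start_age": a, "g_idx": g, "b_idx": b}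
--             for a, g, b in zip(ages, gs, bs)]
-- ===== Notes on version B (the rewrite author's own statement) =====
-- stated objective: alternative
-- what changed: Replaces the single loop with per-iteration modular arithmetic by a table-based construction: each cyclic index sequence is materialised as a rotation (or reversed rotation) of range(m) obtained by slicing, replicated with list multiplication and truncated, and the result rows are assembled by zipping the ages list with the two precomputed index sequences.
import Mathlib
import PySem

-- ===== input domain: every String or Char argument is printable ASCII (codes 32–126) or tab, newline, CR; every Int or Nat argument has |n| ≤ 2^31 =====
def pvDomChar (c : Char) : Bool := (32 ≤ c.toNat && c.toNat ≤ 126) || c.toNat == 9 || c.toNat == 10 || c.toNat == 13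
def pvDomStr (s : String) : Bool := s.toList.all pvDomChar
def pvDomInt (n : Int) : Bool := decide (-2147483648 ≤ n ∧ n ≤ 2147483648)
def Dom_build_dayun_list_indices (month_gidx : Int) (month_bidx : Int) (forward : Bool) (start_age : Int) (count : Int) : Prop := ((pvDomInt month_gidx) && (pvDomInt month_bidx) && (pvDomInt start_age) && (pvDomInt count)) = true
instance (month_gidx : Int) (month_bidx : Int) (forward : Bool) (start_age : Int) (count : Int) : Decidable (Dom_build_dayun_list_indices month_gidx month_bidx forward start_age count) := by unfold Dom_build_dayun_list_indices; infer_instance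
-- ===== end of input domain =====

-- B builds each cyclic index sequence as a sliced rotation of range(m), replicated and truncated,
-- then zips it with the ages list (table construction instead of per-iteration modular arithmetic; same cost).
-- ===== PORT A =====
def build_dayun_list_indices (month_gidx : Int) (month_bidx : Int) (forward : Bool) (start_age : Int) (count : Int) : List (List (String × Int)) :=
  let dirv : Int := if forward then 1 else -1
  (PySem.List.pyRange 1 (count + 1) 1).foldl
    (fun out i =>
      out ++ [[("start_age", start_age + (i - 1) * 10),
               ("g_idx", PySem.Int.mod (month_gidx + dirv * i) 10),
               ("b_idx", PySem.Int.mod (month_bidx + dirv * i) 12)]]) []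

-- ===== PORT B =====
-- _cycle_run of Source B: a rotation of range(m) (forward) or a reversed rotation (backward),
-- repeated with list multiplication and cut to length n
def cycleRun (m : Int) (first : Int) (step : Int) (n : Int) : List Int :=
  let base := PySem.List.pyRange 0 m 1
  let rot := if step == 1 then
      PySem.List.slice base (some first) none ++ PySem.List.slice base none (some first)
    else
      (PySem.List.slice base none (some (first + 1))).reverse ++
      (PySem.List.slice base (some (first + 1)) none).reverse
  let reps := PySem.Int.floordiv (n + m - 1) m
  PySem.List.slice (PySem.List.pyRepeat rot reps) none (some n)

def build_dayun_list_indices_alt (month_gidx : Int) (month_bidx : Int) (forward : Bool) (start_age : Int) (count : Int) : List (List (String × Int)) :=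
  let n : Int := if count > 0 then count else 0
  let step : Int := if forward then 1 else -1
  let gs := cycleRun 10 (PySem.Int.mod (month_gidx + step) 10) step n
  let bs := cycleRun 12 (PySem.Int.mod (month_bidx + step) 12) step n
  let ages := PySem.List.pyRange start_age (start_age + 10 * n) 10
  (ages.zip (gs.zip bs)).map
    (fun t => [("start_age", t.1), ("g_idx", t.2.1), ("b_idx", t.2.2)])

-- ===== PRECONDITION & SPEC =====
def Spec_build_dayun_list_indices (month_gidx : Int) (month_bidx : Int) (forward : Bool) (start_age : Int) (count : Int) (out : List (List (String × Int))) : Prop := out = build_dayun_list_indices_alt month_gidx month_bidx forward start_age count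
instance (month_gidx : Int) (month_bidx : Int) (forward : Bool) (start_age : Int) (count : Int) (out : List (List (String × Int))) : Decidable (Spec_build_dayun_list_indices month_gidx month_bidx forward start_age count out) := by unfold Spec_build_dayun_list_indices; infer_instance

-- ===== CLAIM =====
def Claim_equal_build_dayun_list_indices : Prop := ∀ (month_gidx : Int) (month_bidx : Int) (forward : Bool) (start_age : Int) (count : Int), Dom_build_dayun_list_indices month_gidx month_bidx forward start_age count → Spec_build_dayun_list_indices month_gidx month_bidx forward start_age count (build_dayun_list_indices month_gidx month_bidx forward start_age count)

-- ===== LEMMAS AND PROOFS =====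


lemma take_eq_map_range (l : List Int) (n : Nat) (h : n ≤ l.length) :
    l.take n = (List.range n).map (fun k => l.getD k 0) := by
  apply List.ext_getElem
  · simp [h]
  · intro i h1 h2
    obtain ⟨hi, hil⟩ : i < n ∧ i < l.length := by simpa using h1
    simp [List.getElem_take, List.getD_eq_getElem?_getD, List.getElem?_eq_getElem hil]

lemma take_flatten_replicate (rot : List Int) (m : Nat) (hlen : rot.length = m)
    (_hm0 : 0 < m) : ∀ (r n : Nat), n ≤ r * m →
    ((List.replicate r rot).flatten).take n
      = (List.range n).map (fun k => rot.getD (k % m) 0) := by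
  intro r
  induction r with
  | zero =>
    intro n hn
    have h0 : n = 0 := by omega
    simp [h0]
  | succ r ih =>
    intro n hn
    rw [Nat.succ_mul] at hn
    rw [List.replicate_succ, List.flatten_cons, List.take_append, hlen]
    by_cases hcase : n ≤ m
    · have h0 : n - m = 0 := by omega
      rw [h0, List.take_zero, List.append_nil,
          take_eq_map_range rot n (by omega)]
      apply List.map_congr_left
      intro k hk
      have : k < n := List.mem_range.mp hk
      rw [Nat.mod_eq_of_lt (by omega)]
    · have hsplit : n = m + (n - m) := by omega
      rw [ih (n - m) (by omega)]
      conv_rhs => rw [hsplit, List.range_add, List.map_append, List.map_map]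
      congr 1
      · rw [List.take_of_length_le (by omega)]
        conv_lhs => rw [← List.take_length (l := rot)]
        rw [hlen, take_eq_map_range rot m (by omega)]
        apply List.map_congr_left
        intro k hk
        rw [Nat.mod_eq_of_lt (List.mem_range.mp hk)]
      · apply List.map_congr_left
        intro k hk
        simp only [Function.comp_apply]
        rw [Nat.add_mod_left]

lemma baseD (m i : Nat) (h : i < m) :
    (List.map (fun k : Nat => (k : Int)) (List.range m)).getD i 0 = (i : Int) :=
  PySem.List.getD_map_range _ _ _ _ h

lemma base_len (m : Nat) : (List.map (fun k : Nat => (k : Int)) (List.range m)).length = m := by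
  rw [List.length_map, List.length_range]

lemma dropD (l : List Int) (a i : Nat) : (l.drop a).getD i 0 = l.getD (a + i) 0 := by
  simp only [List.getD_eq_getElem?_getD, List.getElem?_drop]

lemma takeD (l : List Int) (a i : Nat) (h : i < a) : (l.take a).getD i 0 = l.getD i 0 := by
  simp only [List.getD_eq_getElem?_getD, List.getElem?_take, if_pos h]

lemma revD (l : List Int) (i : Nat) (h : i < l.length) :
    l.reverse.getD i 0 = l.getD (l.length - 1 - i) 0 := by
  simp only [List.getD_eq_getElem?_getD, List.getElem?_reverse h]

lemma rotF_getD (m sn : Nat) (hs : sn < m) (j : Nat) (hj : j < m) :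
    (((List.map (fun k : Nat => (k : Int)) (List.range m)).drop sn
        ++ (List.map (fun k : Nat => (k : Int)) (List.range m)).take sn).getD j 0)
      = (((sn + j) % m : Nat) : Int) := by
  have hdl : ((List.map (fun k : Nat => (k : Int)) (List.range m)).drop sn).length = m - sn := by
    rw [List.length_drop, base_len]
  by_cases hc : j < m - sn
  · rw [List.getD_append _ _ _ _ (by omega), dropD, baseD _ _ (by omega),
        Nat.mod_eq_of_lt (by omega)]
  · rw [List.getD_append_right _ _ _ _ (by omega), hdl,
        takeD _ _ _ (by omega), baseD _ _ (by omega),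
        Nat.mod_eq_sub_mod (by omega), Nat.mod_eq_of_lt (by omega)]
    congr 1
    omega

lemma rotB_getD (m sn : Nat) (hs : sn < m) (j : Nat) (hj : j < m) :
    ((((List.map (fun k : Nat => (k : Int)) (List.range m)).take (sn + 1)).reverse
        ++ ((List.map (fun k : Nat => (k : Int)) (List.range m)).drop (sn + 1)).reverse).getD j 0)
      = (((sn + m - j) % m : Nat) : Int) := by
  have htl : ((List.map (fun k : Nat => (k : Int)) (List.range m)).take (sn + 1)).length = sn + 1 := by
    rw [List.length_take, base_len]; omega
  have hdl : ((List.map (fun k : Nat => (k : Int)) (List.range m)).drop (sn + 1)).length = m - (sn + 1) := by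
    rw [List.length_drop, base_len]
  by_cases hc : j ≤ sn
  · rw [List.getD_append _ _ _ _ (by rw [List.length_reverse, htl]; omega),
        revD _ _ (by rw [htl]; omega), htl,
        takeD _ _ _ (by omega), baseD _ _ (by omega),
        Nat.mod_eq_sub_mod (by omega), Nat.mod_eq_of_lt (by omega)]
    congr 1
    omega
  · rw [List.getD_append_right _ _ _ _ (by rw [List.length_reverse, htl]; omega),
        List.length_reverse, htl,
        revD _ _ (by rw [hdl]; omega), hdl, dropD, baseD _ _ (by omega),
        Nat.mod_eq_of_lt (by omega)]
    congr 1
    omega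

lemma base_eq (m : Nat) : PySem.List.pyRange 0 (m : Int) 1
    = List.map (fun k : Nat => (k : Int)) (List.range m) := by
  rw [PySem.List.pyRange_one]
  simp

lemma cycleRun_pos (m first n : Int) :
    cycleRun m first 1 n
      = PySem.List.slice (PySem.List.pyRepeat
          (PySem.List.slice (PySem.List.pyRange 0 m 1) (some first) none
            ++ PySem.List.slice (PySem.List.pyRange 0 m 1) none (some first))
          (PySem.Int.floordiv (n + m - 1) m)) none (some n) := by
  simp [cycleRun]

lemma cycleRun_neg (m first n : Int) :
    cycleRun m first (-1) n
      = PySem.List.slice (PySem.List.pyRepeat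
          ((PySem.List.slice (PySem.List.pyRange 0 m 1) none (some (first + 1))).reverse
            ++ (PySem.List.slice (PySem.List.pyRange 0 m 1) (some (first + 1)) none).reverse)
          (PySem.Int.floordiv (n + m - 1) m)) none (some n) := by
  simp [cycleRun]

lemma cycleRun_eq (m : Nat) (hm0 : 0 < m) (x : Int) (fwd : Bool) (n : Int) (hn : 0 ≤ n)
    (hbound : n ≤ PySem.Int.floordiv (n + (m : Int) - 1) (m : Int) * (m : Int)) :
    cycleRun (m : Int) (PySem.Int.mod x (m : Int)) (if fwd then (1 : Int) else -1) n
      = (List.range n.toNat).map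
          (fun k : Nat => PySem.Int.mod (x + (if fwd then (1 : Int) else -1) * (k : Int)) (m : Int)) := by
  have hmz : (0 : Int) < (m : Int) := by exact_mod_cast hm0
  have hsdef : PySem.Int.mod x (m : Int) = x % (m : Int) := PySem.Int.mod_eq_emod_of_pos hmz
  have hs0 : 0 ≤ x % (m : Int) := Int.emod_nonneg x (by omega)
  have hslt : x % (m : Int) < (m : Int) := Int.emod_lt_of_pos x hmz
  have hsncast : (((x % (m : Int)).toNat : Nat) : Int) = x % (m : Int) := Int.toNat_of_nonneg hs0
  have hsnlt : (x % (m : Int)).toNat < m := by omega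
  have hreps0 : 0 ≤ PySem.Int.floordiv (n + (m : Int) - 1) (m : Int) := by
    rcases le_or_gt 0 (PySem.Int.floordiv (n + (m : Int) - 1) (m : Int)) with h | h
    · exact h
    · exfalso
      have : PySem.Int.floordiv (n + (m : Int) - 1) (m : Int) * (m : Int) < 0 :=
        mul_neg_of_neg_of_pos h hmz
      omega
  have hnt : n.toNat ≤ (PySem.Int.floordiv (n + (m : Int) - 1) (m : Int)).toNat * m := by
    zify
    rw [Int.toNat_of_nonneg hn, Int.toNat_of_nonneg hreps0]
    exact hbound
  cases fwd
  case true =>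
    rw [if_pos rfl, cycleRun_pos, hsdef, base_eq m,
        PySem.List.slice_from _ hs0, PySem.List.slice_to _ hs0,
        PySem.List.slice_to _ hn, PySem.List.pyRepeat,
        take_flatten_replicate _ m (by rw [List.length_append, List.length_drop,
          List.length_take, base_len]; omega) hm0 _ _ hnt]
    apply List.map_congr_left
    intro k hk
    rw [rotF_getD m _ hsnlt (k % m) (Nat.mod_lt _ hm0)]
    have hcast : ((((x % (m : Int)).toNat + k % m) % m : Nat) : Int)
        = ((((x % (m : Int)).toNat : Nat) : Int) + ((k : Int) % (m : Int))) % (m : Int) := by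
      push_cast
      rfl
    rw [hcast, hsncast, PySem.Int.mod_eq_emod_of_pos hmz, ← Int.add_emod]
    congr 1
    ring
  case false =>
    rw [if_neg (by simp), cycleRun_neg, hsdef, base_eq m,
        PySem.List.slice_to (b := x % (m : Int) + 1) _ (by omega),
        PySem.List.slice_from _ (by omega),
        PySem.List.slice_to _ hn, PySem.List.pyRepeat]
    have htn : (x % (m : Int) + 1).toNat = (x % (m : Int)).toNat + 1 := by omega
    rw [htn,
        take_flatten_replicate _ m (by rw [List.length_append, List.length_reverse,
          List.length_reverse, List.length_drop, List.length_take, base_len]; omega) hm0 _ _ hnt]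
    apply List.map_congr_left
    intro k hk
    rw [rotB_getD m _ hsnlt (k % m) (Nat.mod_lt _ hm0)]
    have hkm : k % m < m := Nat.mod_lt _ hm0
    have hcast : ((((x % (m : Int)).toNat + m - k % m) % m : Nat) : Int)
        = ((((x % (m : Int)).toNat : Nat) : Int) + (m : Int) - ((k : Int) % (m : Int))) % (m : Int) := by
      have hle : k % m ≤ (x % (m : Int)).toNat + m := by omega
      push_cast [Nat.cast_sub hle]
      rfl
    rw [hcast, hsncast, PySem.Int.mod_eq_emod_of_pos hmz]
    have : x % (m : Int) + (m : Int) - (k : Int) % (m : Int)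
        = (x % (m : Int) - (k : Int) % (m : Int)) + (m : Int) * 1 := by ring
    rw [this, Int.add_mul_emod_self_left, ← Int.sub_emod]
    congr 1
    ring

theorem build_dayun_list_indices_spec : Claim_equal_build_dayun_list_indices := by
  intro mg mb forward sa count _
  unfold Spec_build_dayun_list_indices
  simp only [build_dayun_list_indices, build_dayun_list_indices_alt]
  have hn : (0 : Int) ≤ (if count > 0 then count else 0) := by split <;> omega
  have hnt : (if count > 0 then count else 0).toNat = count.toNat := by split <;> omega
  have hb10 : (if count > 0 then count else 0)
      ≤ PySem.Int.floordiv ((if count > 0 then count else 0) + (10 : Int) - 1) 10 * 10 := by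
    rw [PySem.Int.floordiv_eq_ediv_of_pos (by norm_num)]
    omega
  have hb12 : (if count > 0 then count else 0)
      ≤ PySem.Int.floordiv ((if count > 0 then count else 0) + (12 : Int) - 1) 12 * 12 := by
    rw [PySem.Int.floordiv_eq_ediv_of_pos (by norm_num)]
    omega
  have hg := cycleRun_eq 10 (by norm_num) (mg + (if forward then (1 : Int) else -1)) forward
      (if count > 0 then count else 0) hn (by push_cast; exact hb10)
  have hbq := cycleRun_eq 12 (by norm_num) (mb + (if forward then (1 : Int) else -1)) forward
      (if count > 0 then count else 0) hn (by push_cast; exact hb12)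
  push_cast at hg hbq
  have hage : ∀ nn : Int, 0 ≤ nn → (if sa < sa + 10 * nn then
      ((sa + 10 * nn - sa + 10 - 1) / 10).toNat else 0) = nn.toNat := by
    intro nn hnn
    split <;> omega
  rw [hg, hbq, PySem.List.foldl_append_singleton_eq_map, List.nil_append,
      PySem.List.pyRange_one 1 (count + 1),
      PySem.List.pyRange_of_pos sa (sa + 10 * (if count > 0 then count else 0)) (by norm_num),
      hage _ hn, List.map_map,
      show count + 1 - 1 = count from by ring, hnt,
      List.zip_map', List.zip_map', List.map_map]
  apply List.map_congr_left
  intro k _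
  simp only [Function.comp_apply, List.cons.injEq, Prod.mk.injEq, and_true, true_and]
  refine ⟨by ring, ?_, ?_⟩
  · congr 1
    ring
  · congr 1
    ring
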